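-- pv_equiv track=rewrite | github.com/shannonturner/metro-map-maker | metro_map_saver/map_saver/mapdata_optimizer.py | reduce_straight_line
-- ===== SOURCE A (Python) =====
-- def reduce_straight_line(line):
--
--     """ Reduce a straight line's xy coordinate pairs
--         to the smallest-possible representation.
--
--         For example: 1,1 1,2 1,3 1,4 1,5 could be written as 1,1 1,5
--     """
--
--     start = line[0]
--     end = line[-1]
--
--     all_x = [x for (x, y) in line]
--     all_y = [y for (x, y) in line]
--
--     if all_x.count(start[0]) == len(line):
--         # x value remains the same for the whole line (vertical)
--         return [start, end]
--     elif all_y.count(start[1]) == len(line):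
--         # y value remains the same for the whole line (horizontal)
--         return [start, end]
--
--     consecutive = {
--         'SE': 1,
--         'NE': 1,
--         'NW': 1,
--         'SW': 1,
--     }
--     for index, xy in enumerate(line):
--         x, y = xy
--         if index == len(line) - 1:
--             continue
--         if x == (line[index + 1][0] + 1) and y == (line[index + 1][1] + 1):
--             consecutive['SE'] += 1
--         if x == (line[index + 1][0] + 1) and y == (line[index + 1][1] - 1):
--             consecutive['NE'] += 1
--         if x == (line[index + 1][0] - 1) and y == (line[index + 1][1] - 1):
--             consecutive['NW'] += 1
--         if x == (line[index + 1][0] - 1) and y == (line[index + 1][1] + 1):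
--             consecutive['SW'] += 1
--
--     for direction in consecutive:
--         if consecutive[direction] == len(line):
--             return [start, end]
--
--     # TODO: More complex line shapes with partial horizontal/vertical/diagonals
--
--     # Can't be reduced further
--     return line
-- ===== SOURCE B (Python) =====
-- def reduce_straight_line(line):
--     """ Reduce a straight line's xy coordinate pairs
--         to the smallest-possible representation.
--
--         For example: 1,1 1,2 1,3 1,4 1,5 could be written as 1,1 1,5
--     """
--     start = line[0]
--     x0, y0 = start
--
--     if all(x == x0 for x, y in line) or all(y == y0 for x, y in line):
--         # vertical (all x equal) or horizontal (all y equal)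
--         return [start, line[-1]]
--
--     for dx, dy in ((1, 1), (1, -1), (-1, 1), (-1, -1)):
--         # diagonal iff every point sits at its predicted position start + i*(dx, dy)
--         if all(line[i] == (x0 + i * dx, y0 + i * dy) for i in range(len(line))):
--             return [start, line[-1]]
--
--     return line
-- ===== Notes on version B (the rewrite author's own statement) =====
-- stated objective: alternative
-- what changed: Replaces A's single pass over consecutive pairs with four direction counters by a closed-form position test: for each candidate unit-diagonal direction d, check line[i] == start + i*d for every index i (plus the order-free all-x-equal / all-y-equal checks).
import Mathlib
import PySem

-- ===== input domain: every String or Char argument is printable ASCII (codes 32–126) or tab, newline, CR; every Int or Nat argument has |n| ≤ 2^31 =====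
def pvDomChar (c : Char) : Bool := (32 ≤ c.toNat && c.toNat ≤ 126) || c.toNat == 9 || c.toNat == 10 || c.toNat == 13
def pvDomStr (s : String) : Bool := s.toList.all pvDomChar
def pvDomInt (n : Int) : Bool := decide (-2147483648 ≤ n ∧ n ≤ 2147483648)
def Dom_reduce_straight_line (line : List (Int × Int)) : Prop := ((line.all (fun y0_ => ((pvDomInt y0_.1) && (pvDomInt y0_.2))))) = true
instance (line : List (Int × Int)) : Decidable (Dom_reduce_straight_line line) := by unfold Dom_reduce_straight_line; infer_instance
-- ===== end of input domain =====

-- B replaces A's consecutive-pair direction counters by a closed-form predicted-position test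
-- line[i] == start + i*d for each candidate diagonal direction d (alternative decomposition, same O(n) cost).

-- ===== PORT A =====
-- loop body of A's 'for index, xy in enumerate(line)'
def rslStep (line : List (Int × Int)) (d : PySem.Dict String Int) (p : Int × (Int × Int)) :
    PySem.Dict String Int :=
  let index := p.1
  let x := p.2.1
  let y := p.2.2
  if index == PySem.List.len line - 1 then d   -- 'continue'
  else
    match PySem.List.pyGet? line (index + 1) with
    | none => d   -- unreachable: index + 1 is always in range when index ≠ len - 1
    | some nxt =>
      let d := if x == nxt.1 + 1 && y == nxt.2 + 1 then d.modify "SE" 0 (· + 1) else d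
      let d := if x == nxt.1 + 1 && y == nxt.2 - 1 then d.modify "NE" 0 (· + 1) else d
      let d := if x == nxt.1 - 1 && y == nxt.2 - 1 then d.modify "NW" 0 (· + 1) else d
      let d := if x == nxt.1 - 1 && y == nxt.2 + 1 then d.modify "SW" 0 (· + 1) else d
      d

def reduce_straight_line (line : List (Int × Int)) : List (Int × Int) :=
  match PySem.List.pyGet? line 0, PySem.List.pyGet? line (-1) with
  | some start, some last =>
    let all_x := line.map (fun p => p.1)
    let all_y := line.map (fun p => p.2)
    if PySem.List.count all_x start.1 == line.length then [start, last]
    else if PySem.List.count all_y start.2 == line.length then [start, last]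
    else
      let consecutive : PySem.Dict String Int :=
        PySem.Dict.ofList [("SE", 1), ("NE", 1), ("NW", 1), ("SW", 1)]
      let consecutive := (PySem.List.enumerate line 0).foldl (rslStep line) consecutive
      -- 'for direction in consecutive: if consecutive[direction] == len(line): return [start, end]'
      if consecutive.items.any (fun kv => kv.2 == PySem.List.len line) then [start, last]
      else line
  | _, _ => line   -- unreachable under Pre_: Python raises IndexError on []

-- ===== PORT B =====
-- 'all(line[i] == (x0 + i*dx, y0 + i*dy) for i in range(len(line)))'
def rslCheckDir (line : List (Int × Int)) (s : Int × Int) (d : Int × Int) : Bool :=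
  (PySem.List.pyRange 0 (PySem.List.len line) 1).all
    (fun i => PySem.List.pyGet? line i == some (s.1 + i * d.1, s.2 + i * d.2))

def reduce_straight_line_alt (line : List (Int × Int)) : List (Int × Int) :=
  match PySem.List.pyGet? line 0 with
  | none => line   -- unreachable under Pre_: Python raises IndexError on []
  | some start =>
    match PySem.List.pyGet? line (-1) with
    | none => line   -- unreachable under Pre_
    | some last =>
      if line.all (fun p => p.1 == start.1) || line.all (fun p => p.2 == start.2) then
        [start, last]
      -- 'for dx, dy in ((1,1),(1,-1),(-1,1),(-1,-1)): if all(...): return [start, line[-1]]'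
      else if [((1 : Int), (1 : Int)), (1, -1), (-1, 1), (-1, -1)].any
          (rslCheckDir line start) then
        [start, last]
      else line

-- ===== PRECONDITION & SPEC =====
-- Pre_ excludes only the empty list, on which Python A raises IndexError at line[0].
def Pre_reduce_straight_line (line : List (Int × Int)) : Prop := line ≠ []
instance (line : List (Int × Int)) : Decidable (Pre_reduce_straight_line line) := by
  unfold Pre_reduce_straight_line; infer_instance

def pvWitness_reduce_straight_line : (List (Int × Int)) := [(0, 0), (1, 1), (2, 2)]

def Spec_reduce_straight_line (line : List (Int × Int)) (out : List (Int × Int)) : Prop :=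
  out = reduce_straight_line_alt line
instance (line : List (Int × Int)) (out : List (Int × Int)) :
    Decidable (Spec_reduce_straight_line line out) := by
  unfold Spec_reduce_straight_line; infer_instance

-- ===== CLAIM (what is proved, stated in full; the proofs are below) =====
def Claim_equal_reduce_straight_line : Prop :=
  ∀ (line : List (Int × Int)), Dom_reduce_straight_line line →
    Pre_reduce_straight_line line →
    Spec_reduce_straight_line line (reduce_straight_line line)

-- ===== LEMMAS AND PROOFS =====

-- step vector of one consecutive pair
def pvDelta (q : (Int × Int) × (Int × Int)) : Int × Int := (q.2.1 - q.1.1, q.2.2 - q.1.2)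

-- the four per-pair conditions of A's loop body
def cSE (q : (Int × Int) × (Int × Int)) : Bool := q.1.1 == q.2.1 + 1 && q.1.2 == q.2.2 + 1
def cNE (q : (Int × Int) × (Int × Int)) : Bool := q.1.1 == q.2.1 + 1 && q.1.2 == q.2.2 - 1
def cNW (q : (Int × Int) × (Int × Int)) : Bool := q.1.1 == q.2.1 - 1 && q.1.2 == q.2.2 - 1
def cSW (q : (Int × Int) × (Int × Int)) : Bool := q.1.1 == q.2.1 - 1 && q.1.2 == q.2.2 + 1

-- A's loop body as a function of the (current, next) pair
def pvPure (d : PySem.Dict String Int) (q : (Int × Int) × (Int × Int)) : PySem.Dict String Int :=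
  let d := if cSE q then d.modify "SE" 0 (· + 1) else d
  let d := if cNE q then d.modify "NE" 0 (· + 1) else d
  let d := if cNW q then d.modify "NW" 0 (· + 1) else d
  let d := if cSW q then d.modify "SW" 0 (· + 1) else d
  d

lemma pvFoldEnum (xs : List (Int × Int)) :
    ∀ (suf : List (Int × Int)) (k : Nat), xs.drop k = suf →
    ∀ d, (PySem.List.enumerate suf (k : Int)).foldl (rslStep xs) d
       = (suf.zip (suf.drop 1)).foldl pvPure d := by
  intro suf
  induction suf with
  | nil => intro k hk d; simp [PySem.List.enumerate_nil]
  | cons a rest ih =>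
    intro k hk d
    have hdk : (xs.drop k).length = xs.length - k := List.length_drop
    have hklt : k < xs.length := by
      by_contra hcon
      have : xs.drop k = [] := List.drop_eq_nil_of_le (by omega)
      rw [hk] at this; simp at this
    cases rest with
    | nil =>
      have hlen : xs.length = k + 1 := by rw [hk] at hdk; simp at hdk; omega
      have hcond : ((((k : Int), a).1) == PySem.List.len xs - 1) = true := by
        show ((k : Int) == PySem.List.len xs - 1) = true
        simp only [PySem.List.len_eq, hlen, beq_iff_eq]
        omega
      have hstep : rslStep xs d ((k : Int), a) = d := by
        simp only [rslStep]
        rw [if_pos hcond]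
      rw [PySem.List.enumerate_cons, PySem.List.enumerate_nil, List.foldl_cons, List.foldl_nil,
        hstep]
      rfl
    | cons b t =>
      have hk2 : k + 2 ≤ xs.length := by rw [hk] at hdk; simp at hdk; omega
      have hcond : ((((k : Int), a).1) == PySem.List.len xs - 1) = false := by
        show ((k : Int) == PySem.List.len xs - 1) = false
        simp only [PySem.List.len_eq, beq_eq_false_iff_ne, ne_eq]
        omega
      have hget : PySem.List.pyGet? xs ((((k : Int), a).1) + 1) = some b := by
        show PySem.List.pyGet? xs ((k : Int) + 1) = some b
        have hc : ((k : Int) + 1) = ((k + 1 : Nat) : Int) := by omega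
        rw [hc, PySem.List.pyGet?_natCast]
        have h2 : (xs.drop k)[1]? = xs[k + 1]? := List.getElem?_drop
        rw [← h2, hk]
        rfl
      have hstep : rslStep xs d ((k : Int), a) = pvPure d (a, b) := by
        simp only [rslStep]
        rw [if_neg (ne_true_of_eq_false hcond), hget]
        rfl
      have hdrop : xs.drop (k + 1) = b :: t := by
        have h3 : xs.drop (k + 1) = (xs.drop k).drop 1 := by rw [List.drop_drop]
        rw [h3, hk]
        rfl
      have hcast : ((k : Int) + 1) = ((k + 1 : Nat) : Int) := by omega
      rw [PySem.List.enumerate_cons, List.foldl_cons, hstep, hcast,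
        ih (k + 1) hdrop (pvPure d (a, b))]
      rfl

lemma pvPureDict (se ne nw sw : Int) (q : (Int × Int) × (Int × Int)) :
    pvPure (PySem.Dict.ofList [("SE", se), ("NE", ne), ("NW", nw), ("SW", sw)]) q =
    PySem.Dict.ofList [("SE", se + if cSE q then 1 else 0), ("NE", ne + if cNE q then 1 else 0),
                       ("NW", nw + if cNW q then 1 else 0), ("SW", sw + if cSW q then 1 else 0)] := by
  unfold pvPure
  split_ifs <;> simp_all <;> rfl

lemma pvFoldPure (qs : List ((Int × Int) × (Int × Int))) :
    ∀ (se ne nw sw : Int),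
    qs.foldl pvPure (PySem.Dict.ofList [("SE", se), ("NE", ne), ("NW", nw), ("SW", sw)]) =
    PySem.Dict.ofList [("SE", se + (qs.countP cSE : Int)), ("NE", ne + (qs.countP cNE : Int)),
                       ("NW", nw + (qs.countP cNW : Int)), ("SW", sw + (qs.countP cSW : Int))] := by
  induction qs with
  | nil => intro se ne nw sw; simp
  | cons q qs ih =>
    intro se ne nw sw
    rw [List.foldl_cons, pvPureDict, ih]
    simp only [List.countP_cons]
    split_ifs <;> simp <;> congr 1 <;> simp [add_comm, add_left_comm]

lemma pvItemsFour (v1 v2 v3 v4 : Int) :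
    (PySem.Dict.ofList [("SE", v1), ("NE", v2), ("NW", v3), ("SW", v4)]).items
    = [("SE", v1), ("NE", v2), ("NW", v3), ("SW", v4)] := rfl

lemma pvCSE (q : (Int × Int) × (Int × Int)) : cSE q = (pvDelta q == ((-1 : Int), (-1 : Int))) := by
  obtain ⟨⟨x, y⟩, ⟨u, v⟩⟩ := q
  rw [Bool.eq_iff_iff]
  simp only [cSE, pvDelta, Bool.and_eq_true, beq_iff_eq, Prod.mk.injEq]
  omega

lemma pvCNE (q : (Int × Int) × (Int × Int)) : cNE q = (pvDelta q == ((-1 : Int), (1 : Int))) := by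
  obtain ⟨⟨x, y⟩, ⟨u, v⟩⟩ := q
  rw [Bool.eq_iff_iff]
  simp only [cNE, pvDelta, Bool.and_eq_true, beq_iff_eq, Prod.mk.injEq]
  omega

lemma pvCNW (q : (Int × Int) × (Int × Int)) : cNW q = (pvDelta q == ((1 : Int), (1 : Int))) := by
  obtain ⟨⟨x, y⟩, ⟨u, v⟩⟩ := q
  rw [Bool.eq_iff_iff]
  simp only [cNW, pvDelta, Bool.and_eq_true, beq_iff_eq, Prod.mk.injEq]
  omega

lemma pvCSW (q : (Int × Int) × (Int × Int)) : cSW q = (pvDelta q == ((1 : Int), (-1 : Int))) := by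
  obtain ⟨⟨x, y⟩, ⟨u, v⟩⟩ := q
  rw [Bool.eq_iff_iff]
  simp only [cSW, pvDelta, Bool.and_eq_true, beq_iff_eq, Prod.mk.injEq]
  omega

lemma pvDirIff (ps : List ((Int × Int) × (Int × Int))) (c : ((Int × Int) × (Int × Int)) → Bool)
    (v : Int × Int) (hcv : ∀ q, c q = (pvDelta q == v)) (n : Int)
    (hn : n = (ps.length : Int) + 1) :
    ((1 : Int) + (ps.countP c : Int) = n) ↔
      ∀ q ∈ ps, pvDelta q = v := by
  subst hn
  have h1 : ((1 : Int) + (ps.countP c : Int) = ((ps.length : Int) + 1)) ↔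
      ps.countP c = ps.length := by
    constructor <;> intro h <;> omega
  rw [h1, List.countP_eq_length]
  constructor
  · intro h q hq
    have := h q hq
    rw [hcv q] at this
    exact beq_iff_eq.mp this
  · intro h q hq
    rw [hcv q]
    exact beq_iff_eq.mpr (h q hq)

lemma pvCountHead (x0 : Int) (ys : List Int) (n : Nat) (hn : n = ys.length + 1) :
    (PySem.List.count (x0 :: ys) x0 = n) ↔ ∀ y ∈ ys, y = x0 := by
  subst hn
  rw [PySem.List.count_eq, show ys.length + 1 = (x0 :: ys).length from rfl, List.count_eq_length]
  constructor
  · intro h y hy; exact (h y (List.mem_cons_of_mem _ hy)).symm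
  · intro h b hb
    rcases List.mem_cons.mp hb with rfl | hb
    · rfl
    · exact (h b hb).symm

lemma pvIteCongr (c1 c2 : Bool) (r s : List (Int × Int)) (h : c1 = c2) :
    (if c1 = true then r else s) = (if c2 = true then r else s) := by rw [h]

-- predicted positions ↔ uniform step over consecutive pairs
lemma pvPosIff (d : Int × Int) :
    ∀ (l : List (Int × Int)) (a : Int × Int),
    (∀ k : Nat, k < (a :: l).length →
        (a :: l)[k]? = some (a.1 + (k : Int) * d.1, a.2 + (k : Int) * d.2)) ↔
    ∀ q ∈ (a :: l).zip l, pvDelta q = d := by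
  intro l
  induction l with
  | nil =>
    intro a
    constructor
    · intro _ q hq; simp at hq
    · intro _ k hk
      have hk0 : k = 0 := by simpa using hk
      subst hk0
      simp
  | cons b t ih =>
    intro a
    constructor
    · intro h q hq
      have hb : b = (a.1 + d.1, a.2 + d.2) := by
        have := h 1 (by simp)
        simpa using this
      have hrest : ∀ k : Nat, k < (b :: t).length →
          (b :: t)[k]? = some (b.1 + (k : Int) * d.1, b.2 + (k : Int) * d.2) := by
        intro k hk
        have := h (k + 1) (by simpa using Nat.succ_lt_succ hk)
        rw [List.getElem?_cons_succ] at this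
        rw [this, hb]
        congr 2 <;> push_cast <;> ring
      rcases List.mem_cons.mp (by simpa [List.zip_cons_cons] using hq) with rfl | hq'
      · simp [pvDelta, hb]
      · exact (ih b).mp hrest q hq'
    · intro h k hk
      have hb : pvDelta (a, b) = d := h (a, b) (by simp [List.zip_cons_cons])
      have hb1 : b.1 = a.1 + d.1 := by
        have := congrArg Prod.fst hb
        simp only [pvDelta] at this
        omega
      have hb2 : b.2 = a.2 + d.2 := by
        have := congrArg Prod.snd hb
        simp only [pvDelta] at this
        omega
      have hb' : b = (a.1 + d.1, a.2 + d.2) := by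
        rw [Prod.ext_iff]
        exact ⟨hb1, hb2⟩
      cases k with
      | zero => simp
      | succ k' =>
        have hrest := (ih b).mpr (fun q hq => h q (by simp [List.zip_cons_cons, hq]))
        have := hrest k' (by simpa using Nat.lt_of_succ_lt_succ hk)
        rw [List.getElem?_cons_succ, this, hb']
        congr 2 <;> push_cast <;> ring

-- B's range-based check ↔ uniform step over consecutive pairs
lemma pvCheckIff (a : Int × Int) (l : List (Int × Int)) (d : Int × Int) :
    rslCheckDir (a :: l) a d = true ↔ ∀ q ∈ (a :: l).zip l, pvDelta q = d := by
  rw [← pvPosIff]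
  unfold rslCheckDir
  rw [PySem.List.pyRange_one]
  simp only [PySem.List.len_eq, sub_zero, Int.toNat_natCast, List.all_map, List.all_eq_true,
    List.mem_range, Function.comp, zero_add, beq_iff_eq, PySem.List.pyGet?_natCast]

-- ===== VERDICT (by name: the statement is the Claim_ definition above) =====
theorem reduce_straight_line_spec : Claim_equal_reduce_straight_line := by
  unfold Claim_equal_reduce_straight_line
  intro ln _hDom hPre
  unfold Spec_reduce_straight_line
  match ln, hPre with
  | a :: l, _ =>
    obtain ⟨z, hz⟩ : ∃ z, (a :: l).getLast? = some z := by
      cases hzl : (a :: l).getLast? with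
      | none => exact absurd (List.getLast?_eq_none_iff.mp hzl) (by simp)
      | some z => exact ⟨z, rfl⟩
    simp only [reduce_straight_line, reduce_straight_line_alt, PySem.List.pyGet?_zero_cons,
      PySem.List.pyGet?_neg_one, hz]
    have hx : (PySem.List.count ((a :: l).map (fun p => p.1)) a.1 == (a :: l).length)
            = ((a :: l).all (fun p => p.1 == a.1)) := by
      rw [Bool.eq_iff_iff]
      simp only [beq_iff_eq, List.map_cons, List.all_cons, beq_self_eq_true, Bool.true_and,
        List.all_eq_true, beq_iff_eq]
      rw [pvCountHead _ _ _ (by simp)]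
      constructor
      · intro h p hp; exact h p.1 (List.mem_map.mpr ⟨p, hp, rfl⟩)
      · intro h y hy; obtain ⟨p, hp, rfl⟩ := List.mem_map.mp hy; exact h p hp
    have hy : (PySem.List.count ((a :: l).map (fun p => p.2)) a.2 == (a :: l).length)
            = ((a :: l).all (fun p => p.2 == a.2)) := by
      rw [Bool.eq_iff_iff]
      simp only [beq_iff_eq, List.map_cons, List.all_cons, beq_self_eq_true, Bool.true_and,
        List.all_eq_true, beq_iff_eq]
      rw [pvCountHead _ _ _ (by simp)]
      constructor
      · intro h p hp; exact h p.2 (List.mem_map.mpr ⟨p, hp, rfl⟩)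
      · intro h y hy; obtain ⟨p, hp, rfl⟩ := List.mem_map.mp hy; exact h p hp
    simp only [hx, hy]
    cases hbx : ((a :: l).all (fun p => p.1 == a.1)) with
    | true => simp
    | false =>
    cases hby : ((a :: l).all (fun p => p.2 == a.2)) with
    | true => simp
    | false =>
    simp only [Bool.or_self, Bool.false_eq_true, if_false]
    have he := pvFoldEnum (a :: l) (a :: l) 0 rfl
      (PySem.Dict.ofList [("SE", 1), ("NE", 1), ("NW", 1), ("SW", 1)])
    simp only [Nat.cast_zero] at he
    rw [he, pvFoldPure, pvItemsFour]
    simp only [List.drop_succ_cons, List.drop_zero, List.any_cons, List.any_nil, Bool.or_false]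
    apply pvIteCongr
    have hn : (PySem.List.len (a :: l) : Int) = ((((a :: l).zip l).length : Int) + 1) := by
      simp [PySem.List.len_eq, List.length_zip]
    rw [Bool.eq_iff_iff]
    simp only [Bool.or_eq_true]
    rw [beq_iff_eq, pvDirIff _ cSE _ pvCSE _ hn]
    rw [beq_iff_eq, pvDirIff _ cNE _ pvCNE _ hn]
    rw [beq_iff_eq, pvDirIff _ cNW _ pvCNW _ hn]
    rw [beq_iff_eq, pvDirIff _ cSW _ pvCSW _ hn]
    rw [pvCheckIff, pvCheckIff, pvCheckIff, pvCheckIff]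
    tauto
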